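-- pv_equiv track=rewrite | github.com/tazmanianDeviloper/CS111 | Man & Khaleh/ps7image/ps7pr5.py | fold_diag
-- ===== SOURCE A (Python) =====
-- def create_uniform_image(height, width, pixel):
--     """ creates and returns a 2-D list of pixels with height rows and
--         width columns in which all of the pixels have the RGB values
--         given by pixel
--         inputs: height and width are non-negative integers
--                 pixel is a 1-D list of RBG values of the form [R,G,B],
--                      where each element is an integer between 0 and 255.
--     """
--     pixels = []
--
--     for r in range(height):
--         row = [pixel] * width
--         pixels += [row]
--
--     return pixels
--
-- def blank_image(height, width):
--     """ creates and returns a 2-D list of pixels with height rows and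
--         width columns in which all of the pixels are green.
--         inputs: height and width are non-negative integers
--     """
--     all_green = create_uniform_image(height, width, [0, 255, 0])
--     return all_green
--
-- def fold_diag(pixels):
--     """Same algorithm as #1 plus added if conditions"""
--     height=len(pixels)
--     width=len(pixels[0])
--     green_pic=blank_image(height, width)
--     for r in range(height):
--         for c in range(width):
--             if r>c:
--                 green_pic[r][c]=[255,255,255]
--             else:
--                 green_pic[r][c]=pixels[r][c]
--     return green_pic
-- ===== SOURCE B (Python) =====
-- def fold_diag(pixels):
--     """Each output row has a closed form: min(r, width) white pixels followed
--     by the row's remaining slice up to width; build it directly per row."""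
--     width = len(pixels[0])
--     return [[[255, 255, 255]] * min(r, width) + row[min(r, width):width]
--             for r, row in enumerate(pixels)]
-- ===== Notes on version B (the rewrite author's own statement) =====
-- stated objective: simpler
-- what changed: A prebuilds an all-green image and then fills every cell with a nested loop and an r>c branch; B has no mutation and no inner loop: each output row is built directly from its closed form, min(r,width) white pixels concatenated with the row's slice [min(r,width):width].
import Mathlib
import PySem

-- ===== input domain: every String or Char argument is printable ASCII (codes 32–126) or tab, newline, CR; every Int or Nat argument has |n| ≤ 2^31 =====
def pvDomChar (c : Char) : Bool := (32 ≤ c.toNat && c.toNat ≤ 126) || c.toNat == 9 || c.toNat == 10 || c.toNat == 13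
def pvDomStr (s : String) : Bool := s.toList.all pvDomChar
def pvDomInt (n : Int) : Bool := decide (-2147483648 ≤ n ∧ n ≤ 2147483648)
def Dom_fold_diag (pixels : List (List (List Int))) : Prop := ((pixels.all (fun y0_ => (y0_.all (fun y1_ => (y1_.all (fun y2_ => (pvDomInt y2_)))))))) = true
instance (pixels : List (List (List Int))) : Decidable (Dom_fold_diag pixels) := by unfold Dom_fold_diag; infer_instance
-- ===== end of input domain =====

-- B drops A's prefill-then-overwrite nested loops: each output row is built directly from
-- its closed form — min(r,width) white pixels ++ the row's slice [min(r,width):width] —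
-- in one comprehension; same O(h*w) cost, no mutation, no inner branch (objective: simpler).
-- Pre_ is exactly the inputs where A returns (A raises IndexError elsewhere).


-- ===== PORT A =====
-- [pixel] * width is PySem.List.pyRepeat; 'pixels += [row]' appends one row per loop turn.
def create_uniform_image (height width : Int) (pixel : List Int) : List (List (List Int)) :=
  (PySem.List.pyRange 0 height 1).foldl
    (fun pixels _r => pixels ++ [PySem.List.pyRepeat [pixel] width]) []

def blank_image (height width : Int) : List (List (List Int)) :=
  create_uniform_image height width [0, 255, 0]

-- 'green_pic[r][c] = v' is ported as set r.toNat on the row fetched with pyGetD; exact here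
-- because r, c produced by range(height)/range(width) are in bounds for green_pic, and
-- pixels[r][c] is in bounds under Pre_ (defaults of pyGetD are never used inside Pre_).
def fold_diag (pixels : List (List (List Int))) : List (List (List Int)) :=
  let height : Int := pixels.length
  let width : Int := (PySem.List.pyGetD pixels 0 []).length   -- pixels[0]: in bounds under Pre_
  let green_pic := blank_image height width
  (PySem.List.pyRange 0 height 1).foldl
    (fun g r =>
      (PySem.List.pyRange 0 width 1).foldl
        (fun g c =>
          g.set r.toNat ((PySem.List.pyGetD g r []).set c.toNat
            (if r > c then [255, 255, 255]
             else PySem.List.pyGetD (PySem.List.pyGetD pixels r []) c [])))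
        g)
    green_pic

-- ===== PORT B =====
-- '[[255,255,255]] * min(r,width)' is pyRepeat; 'row[min(r,width):width]' is slice;
-- the comprehension over enumerate(pixels) is a map over PySem.List.enumerate.
def fold_diag_alt (pixels : List (List (List Int))) : List (List (List Int)) :=
  let width : Int := (PySem.List.pyGetD pixels 0 []).length   -- pixels[0]: in bounds under Pre_
  (PySem.List.enumerate pixels 0).map (fun rc =>
    PySem.List.pyRepeat [([255, 255, 255] : List Int)] (min rc.1 width)
      ++ PySem.List.slice rc.2 (some (min rc.1 width)) (some width))

-- ===== PRECONDITION & SPEC =====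
-- Pre_ is exactly where A returns: nonempty, and every row whose index k is below the
-- width is at least width long (otherwise A reads pixels[k][c] past the end and raises).
def Pre_fold_diag (pixels : List (List (List Int))) : Prop :=
  pixels ≠ [] ∧ ∀ k, k < pixels.length → k < (pixels.headD []).length →
    (pixels.headD []).length ≤ (pixels.getD k []).length
instance (pixels : List (List (List Int))) : Decidable (Pre_fold_diag pixels) := by
  unfold Pre_fold_diag; infer_instance

def pvWitness_fold_diag : List (List (List Int)) :=
  [[[1, 2, 3], [4, 5, 6]], [[7, 8, 9], [10, 11, 12]]]

def Spec_fold_diag (pixels : List (List (List Int))) (out : List (List (List Int))) : Prop :=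
  out = fold_diag_alt pixels
instance (pixels : List (List (List Int))) (out : List (List (List Int))) : Decidable (Spec_fold_diag pixels out) := by
  unfold Spec_fold_diag; infer_instance

-- ===== CLAIM (what is proved, stated in full; the proofs are below) =====
def Claim_equal_fold_diag : Prop :=
  ∀ (pixels : List (List (List Int))), Dom_fold_diag pixels → Pre_fold_diag pixels →
    Spec_fold_diag pixels (fold_diag pixels)

-- ===== LEMMAS AND PROOFS =====

-- The inner column loop 'for c: g[r] = g[r].set c v' commutes into a single row update.
theorem foldl_set_row_comm {Y : Type} (d : List Y) (v : Int → Y) (r : Int) (h0 : 0 ≤ r) :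
    ∀ (cs : List Int) (g : List (List Y)), r.toNat < g.length →
      cs.foldl (fun g c => g.set r.toNat ((PySem.List.pyGetD g r d).set c.toNat (v c))) g
        = g.set r.toNat (cs.foldl (fun row c => row.set c.toNat (v c)) (PySem.List.pyGetD g r d)) := by
  intro cs
  induction cs with
  | nil =>
      intro g hg
      simp [PySem.List.pyGetD_eq_getElem g d h0 (by omega), List.set_getElem_self]
  | cons c cs ih =>
      intro g hg
      simp only [List.foldl_cons]
      rw [ih _ (by simpa using hg)]
      have hx : PySem.List.pyGetD (g.set r.toNat ((PySem.List.pyGetD g r d).set c.toNat (v c))) r d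
          = (PySem.List.pyGetD g r d).set c.toNat (v c) := by
        rw [PySem.List.pyGetD_eq_getElem _ d h0 (by simp; omega)]
        exact List.getElem_set_self (by simpa using hg)
      rw [hx, List.set_set]

-- A loop 'for r in range(|pre|, |pre| + |mid|): g = g.set r (F r g[r])' rewrites the mid
-- segment of pre ++ mid ++ post pointwise.
theorem foldl_rowwise {X : Type} (d : X) (step : List X → Int → List X) (F : Int → X → X)
    (hstep : ∀ (g : List X) (r : Int), 0 ≤ r → r.toNat < g.length →
        step g r = g.set r.toNat (F r (PySem.List.pyGetD g r d))) :
    ∀ (mid pre post : List X),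
      (PySem.List.pyRange (pre.length : Int) ((pre.length : Int) + (mid.length : Int)) 1).foldl
          step (pre ++ (mid ++ post))
        = pre ++ (List.mapIdx (fun i x => F ((pre.length : Int) + (i : Int)) x) mid ++ post) := by
  intro mid
  induction mid with
  | nil =>
      intro pre post
      rw [PySem.List.pyRange_one_eq_nil (by simp)]
      simp
  | cons x mid ih =>
      intro pre post
      rw [PySem.List.pyRange_one_cons (by push_cast [List.length_cons]; omega)]
      simp only [List.foldl_cons]
      rw [hstep _ _ (by positivity) (by
        rw [Int.toNat_natCast]
        simp)]
      have hget : PySem.List.pyGetD (pre ++ (x :: mid ++ post)) (pre.length : Int) d = x := by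
        rw [PySem.List.pyGetD_eq_getElem _ d (by positivity) (by push_cast [List.length_append, List.length_cons]; omega)]
        simp [List.getElem_append_right (Nat.le_refl pre.length)]
      rw [hget]
      have hset : (pre ++ (x :: mid ++ post)).set ((pre.length : Int)).toNat
          (F (pre.length : Int) x) = (pre ++ [F (pre.length : Int) x]) ++ (mid ++ post) := by
        simp
      rw [hset]
      have hb1 : ((pre.length : Int) + 1) = (((pre ++ [F (pre.length : Int) x]).length : Nat) : Int) := by
        simp
      have hb2 : ((pre.length : Int) + (((x :: mid).length : Nat) : Int))
          = (((pre ++ [F (pre.length : Int) x]).length : Nat) : Int) + ((mid.length : Nat) : Int) := by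
        push_cast [List.length_append, List.length_cons, List.length_nil]; ring
      rw [hb2, hb1, ih (pre ++ [F (pre.length : Int) x]) post]
      simp only [List.mapIdx_cons, List.append_assoc, List.length_append, List.length_cons,
        List.length_nil, List.cons_append, List.nil_append]
      congr 2
      congr 1
      apply List.ext_getElem (by simp)
      intro j h1 h2
      simp only [List.getElem_mapIdx]
      congr 1
      push_cast
      ring

-- Canonical value both ports compute (proof-only helper).
def pvGrid (pixels : List (List (List Int))) : List (List (List Int)) :=
  (List.range pixels.length).map (fun (i : Nat) =>
    (List.range (PySem.List.pyGetD pixels 0 []).length).map (fun (c : Nat) =>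
      if c < i then ([255, 255, 255] : List Int)
      else PySem.List.pyGetD (PySem.List.pyGetD pixels (i : Int) []) (c : Int) []))

theorem blank_eq (h w : Int) :
    blank_image h w = List.replicate h.toNat (List.replicate w.toNat ([0, 255, 0] : List Int)) := by
  simp only [blank_image, create_uniform_image, PySem.List.pyRepeat_singleton]
  rw [PySem.List.foldl_append_singleton_eq_map
    (fun _ => List.replicate w.toNat ([0, 255, 0] : List Int)) (PySem.List.pyRange 0 h 1) []]
  simp [List.map_const', PySem.List.length_pyRange_one]

theorem pyGetD_zero_headD (pixels : List (List (List Int))) :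
    PySem.List.pyGetD pixels 0 [] = pixels.headD [] := by
  cases pixels <;> simp [PySem.List.pyGetD, PySem.List.pyGet?, PySem.List.pyIdx?]

-- Characterisation of port A.
theorem fold_diag_eq (pixels : List (List (List Int))) :
    fold_diag pixels = pvGrid pixels := by
  have hkey := foldl_rowwise (d := ([] : List (List Int)))
      (step := fun g r =>
        (PySem.List.pyRange 0 ((PySem.List.pyGetD pixels 0 []).length : Int) 1).foldl
          (fun g c =>
            g.set r.toNat ((PySem.List.pyGetD g r []).set c.toNat
              (if r > c then [255, 255, 255]
               else PySem.List.pyGetD (PySem.List.pyGetD pixels r []) c []))) g)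
      (F := fun r row =>
        (PySem.List.pyRange 0 ((PySem.List.pyGetD pixels 0 []).length : Int) 1).foldl
          (fun row c =>
            row.set c.toNat
              (if r > c then [255, 255, 255]
               else PySem.List.pyGetD (PySem.List.pyGetD pixels r []) c [])) row)
      (fun g r h0 h1 => foldl_set_row_comm [] _ r h0 _ g h1)
      (List.replicate pixels.length
        (List.replicate (PySem.List.pyGetD pixels 0 []).length ([0, 255, 0] : List Int))) [] []
  simp only [List.length_nil, Nat.cast_zero, zero_add, List.nil_append, List.append_nil,
    List.length_replicate] at hkey
  simp only [fold_diag]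
  rw [blank_eq, Int.toNat_natCast, Int.toNat_natCast, hkey]
  apply List.ext_getElem (by simp [pvGrid])
  intro i h1 h2
  rw [List.getElem_mapIdx]
  simp only [List.length_mapIdx, List.length_replicate] at h1
  rw [List.getElem_replicate]
  have hin := foldl_rowwise (d := ([] : List Int))
      (step := fun row c =>
        row.set c.toNat
          (if (i : Int) > c then [255, 255, 255]
           else PySem.List.pyGetD (PySem.List.pyGetD pixels (i : Int) []) c []))
      (F := fun c _ =>
        (if (i : Int) > c then [255, 255, 255]
         else PySem.List.pyGetD (PySem.List.pyGetD pixels (i : Int) []) c []))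
      (fun g r _ _ => rfl)
      (List.replicate (PySem.List.pyGetD pixels 0 []).length ([0, 255, 0] : List Int)) [] []
  simp only [List.length_nil, Nat.cast_zero, zero_add, List.nil_append, List.append_nil,
    List.length_replicate] at hin
  rw [hin]
  simp only [pvGrid]
  rw [List.getElem_map, List.getElem_range]
  apply List.ext_getElem (by simp)
  intro c hc1 hc2
  rw [List.getElem_mapIdx, List.getElem_map, List.getElem_range]
  by_cases hci : c < i
  · simp [hci, show ((c : Int) < (i : Int)) from by exact_mod_cast hci]
  · simp [hci, show ¬ ((c : Int) < (i : Int)) from by exact_mod_cast hci]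

-- Characterisation of port B (needs Pre_: rows with index below the width are ≥ width long).
theorem fold_diag_alt_eq (pixels : List (List (List Int))) (hpre : Pre_fold_diag pixels) :
    fold_diag_alt pixels = pvGrid pixels := by
  set w : Nat := (PySem.List.pyGetD pixels 0 []).length with hw
  simp only [fold_diag_alt, pvGrid, ← hw]
  apply List.ext_getElem (by simp [PySem.List.length_enumerate])
  intro i h1 h2
  simp only [List.length_map, PySem.List.length_enumerate] at h1
  rw [List.getElem_map, List.getElem_map, List.getElem_range, PySem.List.getElem_enumerate]
  simp only [zero_add]
  have hmin : min ((i : Nat) : Int) ((w : Nat) : Int) = ((min i w : Nat) : Int) := by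
    push_cast; omega
  rw [hmin, PySem.List.pyRepeat_singleton, Int.toNat_natCast,
      PySem.List.slice_natCast]
  -- row length facts
  have hwh : w = (pixels.headD []).length := by rw [hw, pyGetD_zero_headD]
  have hlen : min i w < w → w ≤ pixels[i].length := by
    intro hiw
    have := hpre.2 i h1 (by omega)
    rwa [List.getD_eq_getElem pixels _ h1, ← hwh] at this
  apply List.ext_getElem
  · simp only [List.length_append, List.length_replicate, List.length_take, List.length_drop,
      List.length_map, List.length_range]
    by_cases hiw : i < w
    · have := hlen (by omega); omega
    · omega
  intro c hc1 hc2
  simp only [List.length_map, List.length_range] at hc2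
  rw [List.getElem_map, List.getElem_range]
  by_cases hcm : c < min i w
  · rw [List.getElem_append_left (by simpa using hcm), List.getElem_replicate]
    have : c < i := by omega
    simp [this]
  · have hcm' : min i w ≤ c := Nat.not_lt.mp hcm
    have hiw : i ≤ c := by omega
    have hrl : w ≤ pixels[i].length := hlen (by omega)
    rw [List.getElem_append_right (by simpa using hcm')]
    simp only [List.length_replicate, List.getElem_take, List.getElem_drop]
    have hge : ¬ c < i := by omega
    simp only [hge, if_false]
    rw [PySem.List.pyGetD_of_nonneg pixels (i := ((i : Nat) : Int)) ([] : List (List Int)) (by positivity),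
        Int.toNat_natCast, List.getD_eq_getElem pixels _ h1,
        PySem.List.pyGetD_of_nonneg (pixels[i]'h1) (i := ((c : Nat) : Int)) ([] : List Int) (by positivity),
        Int.toNat_natCast, List.getD_eq_getElem _ _ (by omega)]
    congr 1
    omega

-- ===== VERDICT (by name: the statements are the Claim_ definitions above) =====
theorem fold_diag_spec : Claim_equal_fold_diag := by
  intro pixels _ hpre
  unfold Spec_fold_diag
  rw [fold_diag_eq, fold_diag_alt_eq pixels hpre]
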